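-- pv_equiv track=rewrite | github.com/Lambosaurus/Advent-of-code | 2024/22/main.py | compute_profits
-- ===== SOURCE A (Python) =====
-- def prng_next(n):
--     prune_mask = (1 << 24) - 1
--     n = (n ^ (n <<  6)) & prune_mask
--     n = (n ^ (n >>  5))
--     n = (n ^ (n << 11)) & prune_mask
--     return n
--
-- def hash_sequence(sequence):
--     v = 0
--     for s in sequence:
--         v |= s + 10
--         v <<= 5
--     return v
--
-- def compute_profits(n, count):
--     profits = {}
--     sequence = []
--     last_price = 0
--     for i in range(count):
--
--         price = n % 10
--         delta = price - last_price
--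
--         if i > 3:
--             sequence = sequence[1:] + [delta]
--
--             hash = hash_sequence(sequence)
--             if hash not in profits:
--                 profits[hash] = price
--
--         else:
--             sequence += [delta]
--
--         last_price = price
--         n = prng_next(n)
--     return profits
-- ===== SOURCE B (Python) =====
-- def prng_next(n):
--     prune_mask = (1 << 24) - 1
--     n = (n ^ (n <<  6)) & prune_mask
--     n = (n ^ (n >>  5))
--     n = (n ^ (n << 11)) & prune_mask
--     return n
--
-- def hash_sequence(sequence):
--     v = 0
--     for s in sequence:
--         v |= s + 10
--         v <<= 5
--     return v
--
-- def compute_profits(n, count):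
--     # Pass 1: generate all prices up front.
--     prices = []
--     for _ in range(count):
--         prices.append(n % 10)
--         n = prng_next(n)
--     # Consecutive deltas: deltas[j] = prices[j+1] - prices[j].
--     deltas = [b - a for a, b in zip(prices, prices[1:])]
--     # Pass 2: slide a 4-delta window; keep only the first occurrence of each key.
--     profits = {}
--     for i in range(4, count):
--         profits.setdefault(hash_sequence(deltas[i-4:i]), prices[i])
--     return profits
-- ===== Notes on version B (the rewrite author's own statement) =====
-- stated objective: alternative
-- what changed: A is a single-pass state machine threading a dict, a mutating 4-delta window list and the last price through one loop; B is a staged pipeline that first materialises the whole price list, derives the consecutive-delta list with zip, and then runs a separate windowing pass using setdefault to keep only the first occurrence of each key.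
import Mathlib
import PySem

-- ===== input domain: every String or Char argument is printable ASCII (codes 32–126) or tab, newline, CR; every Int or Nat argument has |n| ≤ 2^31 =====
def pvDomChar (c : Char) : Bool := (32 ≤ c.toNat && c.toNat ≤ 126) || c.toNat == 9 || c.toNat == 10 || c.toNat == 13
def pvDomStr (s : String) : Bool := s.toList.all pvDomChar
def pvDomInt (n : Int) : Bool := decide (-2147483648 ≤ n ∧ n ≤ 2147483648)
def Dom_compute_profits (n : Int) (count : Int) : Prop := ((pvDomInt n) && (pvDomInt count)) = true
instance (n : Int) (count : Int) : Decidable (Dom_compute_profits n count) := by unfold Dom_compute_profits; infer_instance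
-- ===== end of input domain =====

-- B replaces A's single-pass state machine (dict + sliding list + last price + PRNG state) by a
-- staged pipeline: generate all prices, derive the delta list, then a separate windowing pass
-- with setdefault (objective: alternative decomposition, same cost).

-- ===== PORT A =====
def prng_next (n : Int) : Int :=
  let prune_mask : Int := (1 <<< 24) - 1
  let n1 := PySem.Int.band (PySem.Int.bxor n (n <<< 6)) prune_mask
  let n2 := PySem.Int.bxor n1 (n1 >>> 5)
  PySem.Int.band (PySem.Int.bxor n2 (n2 <<< 11)) prune_mask

def hash_sequence (sequence : List Int) : Int :=
  sequence.foldl (fun v s => (PySem.Int.bor v (s + 10)) <<< 5) 0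

def compute_profits (n : Int) (count : Int) : List (Int × Int) :=
  let final := (PySem.List.pyRange 0 count 1).foldl
    (fun (st : PySem.Dict Int Int × List Int × Int × Int) i =>
      let price := PySem.Int.mod st.2.2.2 10
      let delta := price - st.2.2.1
      if i > 3 then
        let sequence := PySem.List.slice st.2.1 (some 1) none ++ [delta]
        let h := hash_sequence sequence
        let profits := if st.1.contains h then st.1 else st.1.insert h price
        (profits, sequence, price, prng_next st.2.2.2)
      else
        (st.1, st.2.1 ++ [delta], price, prng_next st.2.2.2))
    (PySem.Dict.empty, [], 0, n)
  final.1.items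

-- ===== PORT B =====
def compute_profits_alt (n : Int) (count : Int) : List (Int × Int) :=
  let gen := (PySem.List.pyRange 0 count 1).foldl
    (fun (st : List Int × Int) _ => (st.1 ++ [PySem.Int.mod st.2 10], prng_next st.2))
    ([], n)
  let prices := gen.1
  let deltas := (prices.zip (PySem.List.slice prices (some 1) none)).map (fun p => p.2 - p.1)
  let profits := (PySem.List.pyRange 4 count 1).foldl
    (fun (profits : PySem.Dict Int Int) i =>
      profits.setdefault (hash_sequence (PySem.List.slice deltas (some (i - 4)) (some i)))
        (PySem.List.pyGetD prices i 0))
    PySem.Dict.empty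
  profits.items

-- ===== PRECONDITION & SPEC =====
def Spec_compute_profits (n : Int) (count : Int) (out : List (Int × Int)) : Prop := out = compute_profits_alt n count
instance (n : Int) (count : Int) (out : List (Int × Int)) : Decidable (Spec_compute_profits n count out) := by unfold Spec_compute_profits; infer_instance

-- ===== CLAIM (what is proved, stated in full; the proofs are below) =====
def Claim_equal_compute_profits : Prop := ∀ (n : Int) (count : Int), Dom_compute_profits n count → Spec_compute_profits n count (compute_profits n count)

-- ===== LEMMAS AND PROOFS =====

def pvIter (n : Int) : Nat → Int
  | 0 => n
  | k+1 => prng_next (pvIter n k)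

def pvPrice (n : Int) (k : Nat) : Int := PySem.Int.mod (pvIter n k) 10

def pvLast (n : Int) : Nat → Int
  | 0 => 0
  | k+1 => pvPrice n k

def pvD (n : Int) (k : Nat) : Int := pvPrice n k - pvLast n k

def pvKey (n : Int) (k : Nat) : Int :=
  hash_sequence [pvD n (k-3), pvD n (k-2), pvD n (k-1), pvD n k]

def pvSeq (n : Int) (k : Nat) : List Int := ((List.range k).map (pvD n)).drop (k - 4)

def pvPrices (n : Int) (c : Nat) : List Int := (List.range c).map (pvPrice n)

def pvProf (n : Int) (c : Int) : PySem.Dict Int Int :=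
  (PySem.List.pyRange 4 c 1).foldl
    (fun d i => if d.contains (pvKey n i.toNat) then d
                else d.insert (pvKey n i.toNat) (pvPrice n i.toNat)) PySem.Dict.empty

lemma pvSeq_window (n : Int) (k : Nat) (hk : 4 ≤ k) :
    pvSeq n k = [pvD n (k-4), pvD n (k-3), pvD n (k-2), pvD n (k-1)] := by
  unfold pvSeq
  rw [← List.map_drop, List.range_eq_range', List.drop_range']
  have h4 : k - (k - 4) = 4 := by omega
  simp only [Nat.zero_add, Nat.mul_one, h4]
  have : List.range' (k-4) 4 = [k-4, k-3, k-2, k-1] := by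
    have e1 : k - 4 + 1 = k - 3 := by omega
    have e2 : k - 3 + 1 = k - 2 := by omega
    have e3 : k - 2 + 1 = k - 1 := by omega
    simp [List.range'_succ, e1, e2, e3]
  rw [this]; simp

lemma A_fold (n : Int) (c : Nat) :
    (PySem.List.pyRange 0 (c:Int) 1).foldl
      (fun (st : PySem.Dict Int Int × List Int × Int × Int) i =>
        let price := PySem.Int.mod st.2.2.2 10
        let delta := price - st.2.2.1
        if i > 3 then
          let sequence := PySem.List.slice st.2.1 (some 1) none ++ [delta]
          let h := hash_sequence sequence
          let profits := if st.1.contains h then st.1 else st.1.insert h price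
          (profits, sequence, price, prng_next st.2.2.2)
        else
          (st.1, st.2.1 ++ [delta], price, prng_next st.2.2.2))
      (PySem.Dict.empty, [], 0, n)
    = (pvProf n c, pvSeq n c, pvLast n c, pvIter n c) := by
  induction c with
  | zero =>
      simp [PySem.List.pyRange_one_eq_nil (by omega : (0:Int) ≤ 0), pvProf, pvSeq, pvLast, pvIter,
            PySem.List.pyRange_one_eq_nil (by omega : (0:Int) ≤ 4)]
  | succ c ih =>
      have hcast : ((c+1 : Nat) : Int) = (c:Int) + 1 := by push_cast; ring
      rw [hcast, PySem.List.pyRange_one_succ_right (by positivity), List.foldl_append, ih]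
      simp only [List.foldl_cons, List.foldl_nil]
      by_cases h4 : 4 ≤ c
      · have hgt : ((c:Int) > 3) := by exact_mod_cast (by omega : (3:Int) < (c:Int))
        rw [if_pos hgt]
        have hseq : PySem.List.slice (pvSeq n c) (some 1) none ++ [PySem.Int.mod (pvIter n c) 10 - pvLast n c]
            = pvSeq n (c+1) := by
          rw [PySem.List.slice_from_one, pvSeq_window n c h4, pvSeq_window n (c+1) (by omega)]
          have e0 : c + 1 - 4 = c - 3 := by omega
          have e1 : c + 1 - 3 = c - 2 := by omega
          have e2 : c + 1 - 2 = c - 1 := by omega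
          have e3 : c + 1 - 1 = c := by omega
          simp [e0, e1, e2, e3, pvD, pvPrice]
        have hprof : ∀ pr : PySem.Dict Int Int, pr = pvProf n c →
            (if pr.contains (hash_sequence (pvSeq n (c+1))) then pr
             else pr.insert (hash_sequence (pvSeq n (c+1))) (PySem.Int.mod (pvIter n c) 10))
            = pvProf n ((c:Int)+1) := by
          intro pr hpr
          have : pvProf n ((c:Int)+1)
              = (if (pvProf n c).contains (pvKey n c) then pvProf n c
                 else (pvProf n c).insert (pvKey n c) (pvPrice n c)) := by
            unfold pvProf
            rw [PySem.List.pyRange_one_succ_right (by exact_mod_cast (by omega : (4:Int) ≤ (c:Int))),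
                List.foldl_append]
            simp only [List.foldl_cons, List.foldl_nil, Int.toNat_natCast]
          rw [this, hpr]
          have hkey : hash_sequence (pvSeq n (c+1)) = pvKey n c := by
            rw [pvSeq_window n (c+1) (by omega)]
            have e0 : c + 1 - 4 = c - 3 := by omega
            have e1 : c + 1 - 3 = c - 2 := by omega
            have e2 : c + 1 - 2 = c - 1 := by omega
            have e3 : c + 1 - 1 = c := by omega
            simp [e0, e1, e2, e3, pvKey]
          rw [hkey]
          rfl
        simp only [hseq, Prod.mk.injEq]
        and_intros <;> first | exact hprof _ rfl | rfl | trivial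
      · have hle : ¬ ((c:Int) > 3) := by
          omega
        rw [if_neg hle]
        have hseq : pvSeq n c ++ [PySem.Int.mod (pvIter n c) 10 - pvLast n c] = pvSeq n (c+1) := by
          unfold pvSeq
          have h0 : c - 4 = 0 := by omega
          have h1 : c + 1 - 4 = 0 := by omega
          rw [h0, h1, List.drop_zero, List.drop_zero, List.range_succ, List.map_append]
          simp [pvD, pvPrice]
        have hprof : pvProf n ((c:Int)+1) = pvProf n c := by
          unfold pvProf
          rw [PySem.List.pyRange_one_eq_nil (by exact_mod_cast (by omega : (c:Int)+1 ≤ 4)),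
              PySem.List.pyRange_one_eq_nil (by exact_mod_cast (by omega : (c:Int) ≤ 4))]
        simp only [hseq, Prod.mk.injEq]
        and_intros <;> first | exact hprof.symm | rfl | trivial

lemma B_gen (n : Int) (c : Nat) :
    (PySem.List.pyRange 0 (c:Int) 1).foldl
      (fun (st : List Int × Int) _ => (st.1 ++ [PySem.Int.mod st.2 10], prng_next st.2)) ([], n)
    = (pvPrices n c, pvIter n c) := by
  induction c with
  | zero => simp [PySem.List.pyRange_one_eq_nil (by omega : (0:Int) ≤ 0), pvPrices, pvIter]
  | succ c ih =>
      have hcast : ((c+1 : Nat) : Int) = (c:Int) + 1 := by push_cast; ring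
      rw [hcast, PySem.List.pyRange_one_succ_right (by positivity), List.foldl_append, ih]
      simp only [List.foldl_cons, List.foldl_nil, Prod.mk.injEq]
      refine ⟨?_, rfl⟩
      unfold pvPrices; rw [List.range_succ, List.map_append]; rfl

lemma B_deltas (n : Int) (c : Nat) :
    ((pvPrices n c).zip (PySem.List.slice (pvPrices n c) (some 1) none)).map (fun p => p.2 - p.1)
    = (List.range (c-1)).map (fun j => pvD n (j+1)) := by
  rw [PySem.List.slice_from_one]
  apply List.ext_getElem
  · simp [pvPrices]
  · intro i h1 h2
    simp [pvPrices, List.getElem_tail, pvD, pvLast]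

lemma B_window (n : Int) (c k : Nat) (hk : 4 ≤ k) (hkc : k < c) :
    PySem.List.slice ((List.range (c-1)).map (fun j => pvD n (j+1))) (some ((k:Int) - 4)) (some (k:Int))
    = [pvD n (k-3), pvD n (k-2), pvD n (k-1), pvD n k] := by
  have h1 : (k:Int) - 4 = ((k - 4 : Nat) : Int) := by omega
  rw [h1, PySem.List.slice_natCast]
  rw [← List.map_drop, List.range_eq_range', List.drop_range']
  simp only [Nat.zero_add, Nat.mul_one]
  have h2 : k - (k - 4) = 4 := by omega
  rw [h2, ← List.map_take, List.take_range'_of_length_ge (by omega : 4 ≤ c - 1 - (k - 4))]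
  have hr : List.range' (k-4) 4 = [k-4, k-3, k-2, k-1] := by
    have e1 : k - 4 + 1 = k - 3 := by omega
    have e2 : k - 3 + 1 = k - 2 := by omega
    have e3 : k - 2 + 1 = k - 1 := by omega
    simp [List.range'_succ, e1, e2, e3]
  rw [hr]
  have f1 : k - 4 + 1 = k - 3 := by omega
  have f2 : k - 3 + 1 = k - 2 := by omega
  have f3 : k - 2 + 1 = k - 1 := by omega
  have f4 : k - 1 + 1 = k := by omega
  simp [f1, f2, f3, f4]

lemma B_prof (n : Int) (c : Nat) :
    (PySem.List.pyRange 4 (c:Int) 1).foldl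
      (fun (profits : PySem.Dict Int Int) i =>
        profits.setdefault
          (hash_sequence (PySem.List.slice ((List.range (c-1)).map (fun j => pvD n (j+1))) (some (i - 4)) (some i)))
          (PySem.List.pyGetD (pvPrices n c) i 0))
      PySem.Dict.empty
    = pvProf n (c:Int) := by
  unfold pvProf
  apply PySem.List.foldl_congr_mem
  intro acc i hi
  obtain ⟨hi4, hic⟩ := (PySem.List.mem_pyRange_one).1 hi
  have hk : i = ((i.toNat : Nat) : Int) := by omega
  rw [hk]
  set k := i.toNat with hkdef
  have hk4 : 4 ≤ k := by omega
  have hkc : k < c := by omega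
  rw [B_window n c k hk4 hkc]
  have hkey : hash_sequence [pvD n (k-3), pvD n (k-2), pvD n (k-1), pvD n k] = pvKey n k := rfl
  rw [hkey]
  have hget : PySem.List.pyGetD (pvPrices n c) ((k : Nat) : Int) 0 = pvPrice n k := by
    rw [PySem.List.pyGetD_of_nonneg _ _ (by omega)]
    simp [pvPrices, List.getD_eq_getElem?_getD, hkc]
  rw [hget]
  simp only [Int.toNat_natCast]
  by_cases hcont : acc.contains (pvKey n k)
  · rw [PySem.Dict.setdefault_of_contains _ _ hcont, if_pos hcont]
  · rw [PySem.Dict.setdefault_of_not_contains _ _ (by simpa using hcont), if_neg hcont]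

theorem compute_profits_main (n count : Int) : compute_profits n count = compute_profits_alt n count := by
  by_cases hc : 0 ≤ count
  · obtain ⟨c, rfl⟩ : ∃ c : Nat, count = (c : Int) := ⟨count.toNat, (Int.toNat_of_nonneg hc).symm⟩
    simp only [compute_profits, compute_profits_alt]
    rw [A_fold n c, B_gen n c]
    simp only []
    rw [B_deltas n c, B_prof n c]
  · have h1 : PySem.List.pyRange 0 count 1 = [] := PySem.List.pyRange_one_eq_nil (by omega)
    have h2 : PySem.List.pyRange 4 count 1 = [] := PySem.List.pyRange_one_eq_nil (by omega)
    simp [compute_profits, compute_profits_alt, h1, h2]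

-- ===== VERDICT (by name: the statement is the Claim_ definition above) =====
theorem compute_profits_spec : Claim_equal_compute_profits := by
  intro n count _
  exact compute_profits_main n count
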